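-- pv_equiv track=rewrite | github.com/shawavisek35/Algorithms | codechef/july-challenge/chefCard.py | solution
-- ===== SOURCE A (Python) =====
-- def solution(rounds):
--     chef = 0
--     friend = 0
--     for round in rounds:
--         A = digitSum(round[0])
--         B = digitSum(round[1])
--         if(A>B):
--             chef += 1
--         elif(A==B):
--             chef +=1
--             friend += 1
--         else:
--             friend += 1
--
--     if(chef>friend):
--         return (0,chef)
--     elif(chef==friend):
--         return (2,chef)
--     else:
--         return (1,friend)
--
-- def digitSum(digit):
--     if(digit<10):
--         return digit
--     else:
--         a = digit
--         while(a>=10):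
--             a = ((a%10) + (a//10))
--         return a
-- ===== SOURCE B (Python) =====
-- def digitRoot(d):
--     return d if d < 10 else 1 + (d - 1) % 9
--
--
-- def solution(rounds):
--     chef = sum(1 for a, b in rounds if digitRoot(a) >= digitRoot(b))
--     friend = sum(1 for a, b in rounds if digitRoot(a) <= digitRoot(b))
--     if chef > friend:
--         return (0, chef)
--     if chef == friend:
--         return (2, chef)
--     return (1, friend)
-- ===== Notes on version B (the rewrite author's own statement) =====
-- stated objective: simpler
-- what changed: digitSum's while-loop is replaced by the closed-form digital root (d if d<10 else 1+(d-1)%9) and the branching chef/friend tally by two 0/1 sums over the rounds.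
import Mathlib
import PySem

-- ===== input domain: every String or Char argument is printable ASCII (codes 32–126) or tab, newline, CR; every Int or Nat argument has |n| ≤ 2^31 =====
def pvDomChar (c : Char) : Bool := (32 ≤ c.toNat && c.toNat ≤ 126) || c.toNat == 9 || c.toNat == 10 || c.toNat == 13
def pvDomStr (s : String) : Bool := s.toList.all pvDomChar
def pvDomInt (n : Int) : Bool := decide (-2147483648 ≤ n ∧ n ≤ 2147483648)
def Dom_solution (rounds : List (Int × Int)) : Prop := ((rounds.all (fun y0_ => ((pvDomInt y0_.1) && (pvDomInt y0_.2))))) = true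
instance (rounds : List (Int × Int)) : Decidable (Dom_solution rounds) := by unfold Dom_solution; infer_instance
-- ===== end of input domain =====

-- B replaces A's while-loop digit sum with the closed-form digital root and the
-- branching tally with two 0/1-sum passes; same return value, objective: simpler.

-- ===== PORT A =====
-- A's while-loop: a = a % 10 + a // 10 until a < 10
def digitSumLoop (a : Int) : Int :=
  if 10 ≤ a then
    digitSumLoop (PySem.Int.mod a 10 + PySem.Int.floordiv a 10)
  else a
termination_by a.toNat
decreasing_by
  rw [PySem.Int.mod_eq_emod_of_pos (by norm_num), PySem.Int.floordiv_eq_ediv_of_pos (by norm_num)]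
  omega

def digitSum (digit : Int) : Int :=
  if digit < 10 then digit else digitSumLoop digit

def solution (rounds : List (Int × Int)) : Int × Int :=
  let res := rounds.foldl
    (fun (st : Int × Int) round =>
      let A := digitSum round.1
      let B := digitSum round.2
      if A > B then (st.1 + 1, st.2)
      else if A = B then (st.1 + 1, st.2 + 1)
      else (st.1, st.2 + 1)) (0, 0)
  let chef := res.1
  let friend := res.2
  if chef > friend then (0, chef)
  else if chef = friend then (2, chef)
  else (1, friend)

-- ===== PORT B =====
def digitRoot (d : Int) : Int :=
  if d < 10 then d else 1 + PySem.Int.mod (d - 1) 9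

def solution_alt (rounds : List (Int × Int)) : Int × Int :=
  let chef : Int :=
    (rounds.map (fun r => if digitRoot r.1 ≥ digitRoot r.2 then (1 : Int) else 0)).sum
  let friend : Int :=
    (rounds.map (fun r => if digitRoot r.1 ≤ digitRoot r.2 then (1 : Int) else 0)).sum
  if chef > friend then (0, chef)
  else if chef = friend then (2, chef)
  else (1, friend)

-- ===== PRECONDITION & SPEC =====
def Spec_solution (rounds : List (Int × Int)) (out : Int × Int) : Prop := out = solution_alt rounds
instance (rounds : List (Int × Int)) (out : Int × Int) : Decidable (Spec_solution rounds out) := by unfold Spec_solution; infer_instance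

-- ===== CLAIM (what is proved, stated in full; the proofs are below) =====
def Claim_equal_solution : Prop := ∀ (rounds : List (Int × Int)), Dom_solution rounds → Spec_solution rounds (solution rounds)

-- ===== LEMMAS AND PROOFS =====

theorem digitSumLoop_eq (n : Nat) : ∀ a : Int, 10 ≤ a → a.toNat ≤ n →
    digitSumLoop a = 1 + (a - 1) % 9 := by
  induction n with
  | zero => intro a ha hn; omega
  | succ n ih =>
    intro a ha hn
    rw [digitSumLoop, if_pos ha,
        PySem.Int.mod_eq_emod_of_pos (by norm_num), PySem.Int.floordiv_eq_ediv_of_pos (by norm_num)]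
    by_cases h' : 10 ≤ a % 10 + a / 10
    · rw [ih _ h' (by omega)]
      omega
    · rw [digitSumLoop, if_neg h']
      omega

theorem digitSum_eq_digitRoot (d : Int) : digitSum d = digitRoot d := by
  unfold digitSum digitRoot
  by_cases h : d < 10
  · simp [h]
  · simp only [h, if_false]
    rw [digitSumLoop_eq d.toNat d (by omega) (le_refl _),
        PySem.Int.mod_eq_emod_of_pos (by norm_num)]

theorem fold_eq_sums (rounds : List (Int × Int)) : ∀ c f : Int,
    rounds.foldl
      (fun (st : Int × Int) round =>
        let A := digitSum round.1
        let B := digitSum round.2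
        if A > B then (st.1 + 1, st.2)
        else if A = B then (st.1 + 1, st.2 + 1)
        else (st.1, st.2 + 1)) (c, f)
    = (c + (rounds.map (fun r => if digitRoot r.1 ≥ digitRoot r.2 then (1 : Int) else 0)).sum,
       f + (rounds.map (fun r => if digitRoot r.1 ≤ digitRoot r.2 then (1 : Int) else 0)).sum) := by
  induction rounds with
  | nil => intro c f; simp
  | cons r rs ih =>
    intro c f
    simp only [List.foldl_cons, List.map_cons, List.sum_cons]
    rw [digitSum_eq_digitRoot, digitSum_eq_digitRoot]
    rcases lt_trichotomy (digitRoot r.1) (digitRoot r.2) with h | h | h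
    · have h1 : ¬ digitRoot r.1 > digitRoot r.2 := by omega
      have h2 : ¬ digitRoot r.1 = digitRoot r.2 := by omega
      simp only [h1, h2, if_false, ih]
      rw [if_neg (by omega : ¬ digitRoot r.1 ≥ digitRoot r.2),
          if_pos (by omega : digitRoot r.1 ≤ digitRoot r.2)]
      simp only [Prod.mk.injEq]; constructor <;> ring
    · simp only [h, lt_irrefl, if_false, gt_iff_lt, le_refl, if_pos, ih]
      simp only [Prod.mk.injEq]; constructor <;> ring
    · have h1 : digitRoot r.1 > digitRoot r.2 := h
      simp only [if_pos h1, ih]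
      rw [if_pos (by omega : digitRoot r.1 ≥ digitRoot r.2),
          if_neg (by omega : ¬ digitRoot r.1 ≤ digitRoot r.2)]
      simp only [Prod.mk.injEq]; constructor <;> ring

-- ===== VERDICT (by name: the statement is the Claim_ definition above) =====
theorem solution_spec : Claim_equal_solution := by
  intro rounds _
  unfold Spec_solution solution solution_alt
  rw [fold_eq_sums rounds 0 0]
  simp
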